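-- pv_equiv track=rewrite | github.com/Unknownflow/CS1010X | PracticalExam/2017Re/cs1010x-repractical-exam-solutions-2017.py | repetitions
-- ===== SOURCE A (Python) =====
-- def factors(n):
--     ans = [1]
--     for i in range(2,n):
--         if n%i == 0:
--             ans.append(i)
--     ans.append(n)
--     return ans
--
-- def repetitions(s):
--     factor_list = factors(len(s))
--     factor_list.sort(reverse=True)
--     for i in factor_list:
--         length = len(s)//i
--         success = True
--         for j in range(1,i):
--             if s[:length] != s[j*length:(j+1)*length]:
--                 success = False
--                 break
--         if success:
--             return i
--     return 0
-- ===== SOURCE B (Python) =====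
-- def repetitions(s):
--     n = len(s)
--     for L in range(1, n + 1):
--         if n % L == 0 and all(s[k] == s[k % L] for k in range(n)):
--             return n // L
--     return 1
-- ===== Notes on version B (the rewrite author's own statement) =====
-- stated objective: simpler
-- what changed: Instead of building the full factor list, reverse-sorting it and comparing every block slice to the first block for each candidate count, B scans block lengths ascending and returns n//L for the first divisor L of n=len(s) whose single character-wise test s[k]==s[k%L] holds, which is the same value since the largest repetition count corresponds to the smallest valid block length.
import Mathlib
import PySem

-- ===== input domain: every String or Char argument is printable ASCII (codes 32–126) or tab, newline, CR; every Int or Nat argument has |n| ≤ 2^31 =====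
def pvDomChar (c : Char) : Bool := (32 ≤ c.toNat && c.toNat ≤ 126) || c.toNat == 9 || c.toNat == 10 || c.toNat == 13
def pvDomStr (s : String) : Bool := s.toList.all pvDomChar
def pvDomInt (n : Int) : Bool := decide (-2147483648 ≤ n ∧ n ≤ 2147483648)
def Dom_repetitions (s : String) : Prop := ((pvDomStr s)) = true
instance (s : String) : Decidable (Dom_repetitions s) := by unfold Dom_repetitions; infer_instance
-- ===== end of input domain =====

-- B replaces A's build-all-factors + reverse-sort + block-slice scan by an ascending scan for
-- the SMALLEST block length L dividing len(s) with s[k] == s[k % L], returning n // L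
-- (simpler: no factor list, no sort; same return value everywhere).

-- ===== PORT A =====
-- factors(n): ans = [1]; for i in range(2, n): if n % i == 0: ans.append(i); ans.append(n)
def pvFactors (n : Int) : List Int :=
  ((PySem.List.pyRange 2 n 1).foldl
    (fun acc i => if PySem.Int.mod n i == 0 then acc ++ [i] else acc) [1]) ++ [n]

-- inner loop of A: success stays True iff every block j equals block 0 (break on first mismatch)
def pvCheckA (l : List Char) (i length : Int) : Bool :=
  (PySem.List.pyRange 1 i 1).all (fun j =>
    PySem.List.slice l none (some length) ==
      PySem.List.slice l (some (j * length)) (some ((j + 1) * length)))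

-- the 'for i in factor_list' loop with its early 'return i'; falls through to 'return 0'
def pvLoopA (l : List Char) (n : Int) : List Int → Int
  | [] => 0
  | i :: rest =>
      let length := PySem.Int.floordiv n i
      if pvCheckA l i length then i else pvLoopA l n rest

def repetitions (s : String) : Int :=
  let factor_list := PySem.List.sorted (pvFactors (PySem.Str.len s)) (fun x => x) true
  pvLoopA s.toList (PySem.Str.len s) factor_list

-- ===== PORT B =====
-- for L in range(1, n+1): if n % L == 0 and all(s[k] == s[k % L] for k in range(n)): return n // L
def pvLoopB (l : List Char) (n : Int) : List Int → Int
  | [] => 1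
  | L :: rest =>
      if PySem.Int.mod n L == 0 &&
          (PySem.List.pyRange 0 n 1).all (fun k =>
            PySem.List.pyGet? l k == PySem.List.pyGet? l (PySem.Int.mod k L))
      then PySem.Int.floordiv n L
      else pvLoopB l n rest

def repetitions_alt (s : String) : Int :=
  let n := PySem.Str.len s
  pvLoopB s.toList n (PySem.List.pyRange 1 (n + 1) 1)

-- ===== PRECONDITION & SPEC =====
def Spec_repetitions (s : String) (out : Int) : Prop := out = repetitions_alt s
instance (s : String) (out : Int) : Decidable (Spec_repetitions s out) := by unfold Spec_repetitions; infer_instance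

-- ===== CLAIM (what is proved, stated in full; the proofs are below) =====
def Claim_equal_repetitions : Prop := ∀ (s : String), Dom_repetitions s → Spec_repetitions s (repetitions s)

-- ===== LEMMAS AND PROOFS =====

-- Nat-level periodicity check both loops reduce to
def pvChk (l : List Char) (L : Nat) : Bool :=
  (List.range l.length).all (fun k => l[k]? == l[k % L]?)

-- ascending list of the divisors of n in [1, n]
def pvDivs (n : Nat) : List Nat := (List.range' 1 n).filter (fun L => n % L == 0)

theorem pvLoopB_eq (l : List Char) (ls : List Nat) :
    pvLoopB l (l.length : Int) (ls.map Nat.cast) =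
      match ls.find? (fun L => (l.length % L == 0) && pvChk l L) with
      | some L => (↑(l.length / L) : Int)
      | none => 1 := by
  induction ls with
  | nil => simp [pvLoopB]
  | cons L t ih =>
    simp only [List.map_cons, pvLoopB, List.find?_cons]
    have hc : (PySem.Int.mod (l.length : Int) (L : Int) == 0 &&
        (PySem.List.pyRange 0 (l.length : Int) 1).all (fun k =>
          PySem.List.pyGet? l k == PySem.List.pyGet? l (PySem.Int.mod k (L : Int)))) =
        ((l.length % L == 0) && pvChk l L) := by
      rw [PySem.Int.mod_natCast, PySem.List.pyRange_zero]
      congr 1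
      · simp [Int.natCast_dvd_natCast, Nat.dvd_iff_mod_eq_zero]
      · simp only [pvChk, List.all_map, Function.comp_def, PySem.Int.mod_natCast,
          PySem.List.pyGet?_natCast, Int.toNat_natCast]
    rw [hc]
    cases h : ((l.length % L == 0) && pvChk l L) with
    | false => simp [ih]
    | true => simp [PySem.Int.floordiv_natCast]

theorem pvLoopA_eq (l : List Char) (ls : List Nat) :
    pvLoopA l (l.length : Int) (ls.map Nat.cast) =
      match ls.find? (fun i : Nat => pvCheckA l (↑i) (↑(l.length / i) : Int)) with
      | some i => (i : Int)
      | none => 0 := by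
  induction ls with
  | nil => simp [pvLoopA]
  | cons i t ih =>
    simp only [List.map_cons, pvLoopA, List.find?_cons, PySem.Int.floordiv_natCast]
    cases h : pvCheckA l i (↑(l.length / i) : Int) with
    | false => simp [ih]
    | true => simp

theorem pvCheckA_eq_chk (l : List Char) (i L : Nat) (hL : 1 ≤ L) (hiL : i * L = l.length) :
    pvCheckA l (↑i) (↑L) = pvChk l L := by
  rw [Bool.eq_iff_iff]
  simp only [pvCheckA, pvChk, List.all_eq_true, List.mem_range, beq_iff_eq,
    PySem.List.mem_pyRange_one]
  constructor
  · intro h k hk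
    by_cases hkL : k < L
    · rw [Nat.mod_eq_of_lt hkL]
    · push Not at hkL
      set jn := k / L with hjn
      have hj1 : 1 ≤ jn := (Nat.one_le_div_iff (by omega)).mpr hkL
      have hji : jn < i := by
        rw [hjn, Nat.div_lt_iff_lt_mul (by omega)]
        omega
      have hs := h (↑jn) ⟨by exact_mod_cast hj1, by exact_mod_cast hji⟩
      rw [PySem.List.slice_to_natCast] at hs
      have e1 : ((jn : Int) * ↑L) = ((jn * L : Nat) : Int) := by push_cast; ring
      have e2 : (((jn : Int) + 1) * ↑L) = ((jn * L + L : Nat) : Int) := by push_cast; ring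
      rw [e1, e2, PySem.List.slice_natCast] at hs
      have e3 : jn * L + L - jn * L = L := by omega
      rw [e3] at hs
      set r := k % L with hr
      have hrL : r < L := Nat.mod_lt _ (by omega)
      have hk' : jn * L + r = k := by
        rw [hjn, hr, Nat.mul_comm]
        exact Nat.div_add_mod k L
      calc l[k]? = (l.drop (jn * L))[r]? := by rw [List.getElem?_drop, hk']
        _ = ((l.drop (jn * L)).take L)[r]? := by rw [List.getElem?_take_of_lt hrL]
        _ = (l.take L)[r]? := by rw [← hs]
        _ = l[r]? := by rw [List.getElem?_take_of_lt hrL]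
  · intro h j hj
    lift j to ℕ using (by omega)
    have hj1 : 1 ≤ j := by exact_mod_cast hj.1
    have hji : j < i := by exact_mod_cast hj.2
    rw [PySem.List.slice_to_natCast]
    have e1 : ((j : Int) * ↑L) = ((j * L : Nat) : Int) := by push_cast; ring
    have e2 : (((j : Int) + 1) * ↑L) = ((j * L + L : Nat) : Int) := by push_cast; ring
    rw [e1, e2, PySem.List.slice_natCast]
    have e3 : j * L + L - j * L = L := by omega
    rw [e3]
    apply List.ext_getElem?
    intro m
    by_cases hm : m < L
    · have hkn : j * L + m < l.length := by
        have h4 : j * L + m < (j + 1) * L := by ring_nf; omega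
        have h5 : (j + 1) * L ≤ i * L := Nat.mul_le_mul_right L (by omega)
        omega
      have h6 := h (j * L + m) hkn
      have e4 : (j * L + m) % L = m := by
        rw [Nat.add_comm, Nat.add_mul_mod_self_right, Nat.mod_eq_of_lt hm]
      rw [e4] at h6
      rw [List.getElem?_take_of_lt hm, List.getElem?_take_of_lt hm, List.getElem?_drop, h6]
    · push Not at hm
      rw [List.getElem?_eq_none (by simp; omega), List.getElem?_eq_none (by simp; omega)]

theorem mem_pvDivs (n L : Nat) : L ∈ pvDivs n ↔ 1 ≤ L ∧ L ≤ n ∧ L ∣ n := by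
  rw [pvDivs, List.mem_filter, List.mem_range'_1, beq_iff_eq]
  constructor
  · rintro ⟨⟨h1, h2⟩, hd⟩
    exact ⟨h1, by omega, Nat.dvd_iff_mod_eq_zero.mpr hd⟩
  · rintro ⟨h1, h2, hd⟩
    exact ⟨⟨h1, by omega⟩, Nat.dvd_iff_mod_eq_zero.mp hd⟩

theorem pvDivs_pairwise (n : Nat) : (pvDivs n).Pairwise (· < ·) :=
  (List.pairwise_lt_range' (s := 1) (n := n)).filter _

theorem pvDivs_nodup (n : Nat) : (pvDivs n).Nodup :=
  (List.nodup_range' 1).filter _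

theorem pv_div_lt_div (n a b : Nat) (ha : a ∣ n) (hb : b ∣ n) (h : a < b) (h1 : 1 ≤ a)
    (hn : b ≤ n) : n / b < n / a := by
  have hnb : n / b * b = n := Nat.div_mul_cancel hb
  have hna : n / a * a = n := Nat.div_mul_cancel ha
  have hpos : 0 < n / b := Nat.div_pos hn (by omega)
  by_contra hcon
  push Not at hcon
  have h2 : n / a * a ≤ n / b * a := Nat.mul_le_mul_right a hcon
  have h3 : n / b * a < n / b * b := Nat.mul_lt_mul_of_le_of_lt (Nat.le_refl (n / b)) h hpos
  omega

theorem pvDivs_map_div (n : Nat) (hn : 1 ≤ n) :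
    (pvDivs n).map (fun L => n / L) = (pvDivs n).reverse := by
  have hnd := pvDivs_nodup n
  have hpw := pvDivs_pairwise n
  have hmem : ∀ L ∈ pvDivs n, 1 ≤ L ∧ L ≤ n ∧ L ∣ n := fun L h => (mem_pvDivs n L).mp h
  have key : ∀ a ∈ pvDivs n, ∀ b ∈ pvDivs n, a < b → n / b < n / a := by
    intro a ha b hb hab
    obtain ⟨ha1, han, had⟩ := hmem a ha
    obtain ⟨hb1, hbn, hbd⟩ := hmem b hb
    exact pv_div_lt_div n a b had hbd hab ha1 hbn
  have hnd2 : ((pvDivs n).map (fun L => n / L)).Nodup := by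
    apply hnd.map_on
    intro a ha b hb hab
    obtain ⟨ha1, han, had⟩ := hmem a ha
    obtain ⟨hb1, hbn, hbd⟩ := hmem b hb
    have h1 : n / (n / a) = a := Nat.div_div_self had (by omega)
    have hb' : n / (n / b) = b := Nat.div_div_self hbd (by omega)
    rw [← h1, hab, hb']
  have hpw2 : ((pvDivs n).map (fun L => n / L)).Pairwise (· > ·) := by
    rw [List.pairwise_map]
    exact hpw.imp_of_mem (fun {a b} ha hb hab => key a ha b hb hab)
  have hpw3 : ((pvDivs n).reverse).Pairwise (· > ·) := by
    rw [List.pairwise_reverse]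
    exact hpw
  have hperm : ((pvDivs n).map (fun L => n / L)).Perm ((pvDivs n).reverse) := by
    rw [List.perm_ext_iff_of_nodup hnd2 (List.nodup_reverse.mpr hnd)]
    intro x
    simp only [List.mem_map, List.mem_reverse]
    constructor
    · rintro ⟨a, ha, rfl⟩
      obtain ⟨ha1, han, had⟩ := hmem a ha
      rw [mem_pvDivs]
      exact ⟨(Nat.one_le_div_iff (by omega)).mpr han, Nat.div_le_self _ _, Nat.div_dvd_of_dvd had⟩
    · intro hx
      obtain ⟨hx1, hxn, hxd⟩ := (mem_pvDivs n x).mp hx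
      refine ⟨n / x, ?_, Nat.div_div_self hxd (by omega)⟩
      rw [mem_pvDivs]
      exact ⟨(Nat.one_le_div_iff (by omega)).mpr hxn, Nat.div_le_self _ _, Nat.div_dvd_of_dvd hxd⟩
  exact List.Perm.eq_of_pairwise (fun a b _ _ h1 h2 => by omega) hpw2 hpw3 hperm

theorem pvFactors_eq (n : Nat) (hn : 2 ≤ n) :
    pvFactors (n : Int) = (pvDivs n).map Nat.cast := by
  rw [pvFactors, PySem.List.foldl_append_if_eq_filter, PySem.List.pyRange_one]
  have h2 : ((n : Int) - 2).toNat = n - 2 := by omega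
  rw [h2]
  have hr : List.range' 1 n = 1 :: (List.range' 2 (n - 2) ++ [n]) := by
    obtain ⟨m, rfl⟩ : ∃ m, n = m + 2 := ⟨n - 2, by omega⟩
    rw [List.range'_succ]
    norm_num
    rw [List.range'_concat]
    have e : 2 + 1 * m = m + 2 := by omega
    rw [e]
  rw [pvDivs, hr]
  simp only [List.filter_cons, List.filter_append]
  norm_num [Nat.mod_one, Nat.mod_self]
  rw [List.range'_eq_map_range, List.filter_map, List.filter_map, List.map_map]
  have hf : (Nat.cast ∘ fun x : Nat => 2 + x) = (fun k : Nat => (2 : Int) + ↑k) := by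
    funext k; simp [Function.comp]
  have hp : ((fun i : Int => PySem.Int.mod (↑n) i == 0) ∘ fun k : Nat => (2:Int) + ↑k)
      = ((fun L : Nat => n % L == 0) ∘ fun x : Nat => 2 + x) := by
    funext k
    simp only [Function.comp]
    rw [show ((2:Int) + (k:Int)) = ((2 + k : Nat) : Int) by push_cast; ring, PySem.Int.mod_natCast]
    rw [Bool.eq_iff_iff]
    simp only [beq_iff_eq]
    exact Int.natCast_eq_zero
  rw [hf, hp]

theorem pvChk_self (l : List Char) : pvChk l l.length = true := by
  simp only [pvChk, List.all_eq_true, List.mem_range, beq_iff_eq]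
  intro k hk
  rw [Nat.mod_eq_of_lt hk]

theorem pv_find?_congr {α : Type} (l : List α) (p q : α → Bool)
    (h : ∀ x ∈ l, p x = q x) : l.find? p = l.find? q := by
  induction l with
  | nil => rfl
  | cons a t ih =>
    rw [List.find?_cons, List.find?_cons, h a List.mem_cons_self,
      ih (fun x hx => h x (List.mem_cons_of_mem a hx))]

-- ===== VERDICT (by name: the statement is the Claim_ definition above) =====
theorem repetitions_spec : Claim_equal_repetitions := by
  unfold Claim_equal_repetitions
  intro s _
  unfold Spec_repetitions repetitions repetitions_alt
  rw [PySem.Str.len_eq]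
  set l := s.toList with hl
  change pvLoopA l (↑l.length) (PySem.List.sorted (pvFactors ↑l.length) (fun x => x) true) =
    pvLoopB l (↑l.length) (PySem.List.pyRange 1 ((l.length : Int) + 1) 1)
  have hB : PySem.List.pyRange 1 ((l.length : Int) + 1) 1 = (List.range' 1 l.length).map Nat.cast := by
    rw [PySem.List.pyRange_one, List.range'_eq_map_range, List.map_map]
    have e : ((l.length : Int) + 1 - 1).toNat = l.length := by omega
    rw [e]
    apply List.map_congr_left
    intro k _
    simp [Function.comp]
  rw [hB, pvLoopB_eq]
  -- B = match over range' 1 n; reduce to divisors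
  have hBfind : (List.range' 1 l.length).find? (fun L => (l.length % L == 0) && pvChk l L) =
      (pvDivs l.length).find? (pvChk l) := by
    rw [pvDivs, List.find?_filter]
    apply pv_find?_congr
    intro x _
    rw [Bool.eq_iff_iff]
    simp
  rw [hBfind]
  rcases Nat.lt_or_ge l.length 2 with hn2 | hn2
  · rcases hl0 : l.length with _ | k
    · -- n = 0 : l = []
      have hnil : l = [] := List.length_eq_zero_iff.mp hl0
      rw [hnil]
      decide
    · -- n = 1 : l = [c]
      have hk0 : k = 0 := by omega
      subst hk0
      obtain ⟨c, hc⟩ := List.length_eq_one_iff.mp hl0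
      norm_num
      rw [hc]
      have hs : PySem.List.sorted (pvFactors (1 : Int)) (fun x => x) true = [1, 1] := by
        decide
      rw [hs]
      have hcheck : pvCheckA [c] 1 1 = true := by
        simp [pvCheckA, PySem.List.pyRange_one_eq_nil]
      have hchk1 : pvChk [c] 1 = true := by
        simp [pvChk]
      have hd1 : pvDivs 1 = [1] := by decide
      rw [hd1]
      simp [pvLoopA, hcheck, hchk1]
  · -- n ≥ 2
    have hn1 : 1 ≤ l.length := by omega
    rw [pvFactors_eq l.length hn2]
    have hsorted : PySem.List.sorted ((pvDivs l.length).map (Nat.cast : Nat → Int)) (fun x => x) true =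
        ((pvDivs l.length).reverse).map (Nat.cast : Nat → Int) := by
      apply PySem.List.sorted_rev_eq_of_perm_of_pairwise_gt
      · rw [List.map_reverse]
        exact (List.reverse_perm _)
      · rw [List.map_reverse, List.pairwise_reverse, List.pairwise_map]
        exact (pvDivs_pairwise l.length).imp (fun {a b} hab => by exact_mod_cast hab)
    rw [hsorted, pvLoopA_eq, ← pvDivs_map_div l.length hn1, List.find?_map]
    have hcong : (pvDivs l.length).find?
        ((fun i : Nat => pvCheckA l (↑i) (↑(l.length / i) : Int)) ∘ (fun L => l.length / L)) =
        (pvDivs l.length).find? (pvChk l) := by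
      apply pv_find?_congr
      intro L hmemL
      obtain ⟨hL1, hLn, hLd⟩ := (mem_pvDivs l.length L).mp hmemL
      simp only [Function.comp]
      rw [Nat.div_div_self hLd (by omega)]
      exact pvCheckA_eq_chk l (l.length / L) L hL1 (Nat.div_mul_cancel hLd)
    rw [hcong]
    cases hfind : (pvDivs l.length).find? (pvChk l) with
    | none =>
      exfalso
      have hmemn : l.length ∈ pvDivs l.length := (mem_pvDivs l.length l.length).mpr
        ⟨by omega, le_refl _, dvd_refl _⟩
      have := List.find?_eq_none.mp hfind l.length hmemn
      exact this (pvChk_self l)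
    | some L => simp
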